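-- pv_equiv track=rewrite | github.com/abhirammaddukuri/minorproject2 | flamesminorpro2daa.py | flames
-- ===== SOURCE A (Python) =====
-- def flames(player1, player2):
--     # Convert names to lowercase and remove common characters
--     common_chars = set(player1.lower()) & set(player2.lower())
--     remaining_chars1 = [char for char in player1.lower() if char not in common_chars]
--     remaining_chars2 = [char for char in player2.lower() if char not in common_chars]
--
--     # Calculate the count of remaining characters
--     count = len(remaining_chars1) + len(remaining_chars2)
--
--     # Define the FLAMES array
--     flames_array = ['F', 'L', 'A', 'M', 'E', 'S']
--
--     # Remove letters from FLAMES array using the count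
--     index = 0
--     while len(flames_array) > 1:
--         index = (index + count - 1) % len(flames_array)
--         flames_array.pop(index)
--
--     # Get the result
--     result = flames_array[0]
--
--     # Map the result to a status
--     status_map = {
--         'F': 'Friends',
--         'L': 'Lovers',
--         'A': 'Affectionate',
--         'M': 'Marriage',
--         'E': 'Enemies',
--         'S': 'Siblings'
--     }
--     status = status_map[result]
--
--     return status
-- ===== SOURCE B (Python) =====
-- def flames(player1, player2):
--     # Same character preprocessing as the original
--     common_chars = set(player1.lower()) & set(player2.lower())
--     count = sum(1 for ch in player1.lower() if ch not in common_chars) \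
--           + sum(1 for ch in player2.lower() if ch not in common_chars)
--
--     # Josephus recurrence: accumulate the surviving index instead of
--     # simulating deletions with list.pop
--     survivor = 0
--     for i in range(2, 7):
--         survivor = (survivor + count) % i
--
--     flames_list = ['F', 'L', 'A', 'M', 'E', 'S']
--     result = flames_list[survivor]
--
--     status_map = {
--         'F': 'Friends',
--         'L': 'Lovers',
--         'A': 'Affectionate',
--         'M': 'Marriage',
--         'E': 'Enemies',
--         'S': 'Siblings'
--     }
--     return status_map[result]
-- ===== Notes on version B (the rewrite author's own statement) =====
-- stated objective: alternative
-- what changed: Replaces the pop-based elimination loop over a mutated list with the Josephus recurrence survivor=(survivor+count)%i for i in 2..6, maintaining only an integer index, then indexes the fixed FLAMES list once.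
import Mathlib
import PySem

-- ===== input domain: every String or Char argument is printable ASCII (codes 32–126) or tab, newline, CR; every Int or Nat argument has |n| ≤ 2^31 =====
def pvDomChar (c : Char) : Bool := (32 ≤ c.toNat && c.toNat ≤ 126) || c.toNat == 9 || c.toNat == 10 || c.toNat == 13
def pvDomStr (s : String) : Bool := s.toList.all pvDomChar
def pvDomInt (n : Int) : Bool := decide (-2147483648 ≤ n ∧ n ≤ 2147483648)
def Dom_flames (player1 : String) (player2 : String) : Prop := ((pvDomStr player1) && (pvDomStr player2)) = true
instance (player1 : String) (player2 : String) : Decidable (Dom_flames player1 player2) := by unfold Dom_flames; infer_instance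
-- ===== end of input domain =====

-- B replaces A's pop-based elimination of the FLAMES list by the Josephus
-- recurrence on a single integer index (objective: alternative algorithm).

-- ===== PORT A =====
-- while len(flames_array) > 1: index = (index+count-1) % len; pop(index)
-- fuel = initial list length makes the recursion structural; the loop removes
-- one element per step, so fuel never runs out.
def flamesLoopAux : Nat → List Char → Int → Int → List Char
  | 0, arr, _, _ => arr
  | n + 1, arr, index, count =>
    if 1 < arr.length then
      let index' := PySem.Int.mod (index + count - 1) (arr.length : Int)
      match PySem.List.pop? arr index' with
      | some (_, rest) => flamesLoopAux n rest index' count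
      | none => arr   -- unreachable: 0 ≤ index' < arr.length
    else arr

def flames (player1 : String) (player2 : String) : String :=
  let c1 := PySem.Chars.lower player1.toList
  let c2 := PySem.Chars.lower player2.toList
  let common_chars := PySem.Set.inter (PySem.Set.ofList c1) (PySem.Set.ofList c2)
  let remaining_chars1 := c1.filter (fun ch => !(PySem.Set.contains common_chars ch))
  let remaining_chars2 := c2.filter (fun ch => !(PySem.Set.contains common_chars ch))
  let count : Int := (remaining_chars1.length : Int) + (remaining_chars2.length : Int)
  let flames_array : List Char := ['F', 'L', 'A', 'M', 'E', 'S']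
  let final := flamesLoopAux flames_array.length flames_array 0 count
  let result := final.headD 'F'   -- flames_array[0]; the loop keeps the list nonempty
  let status_map : PySem.Dict Char String := PySem.Dict.ofList
    [('F', "Friends"), ('L', "Lovers"), ('A', "Affectionate"),
     ('M', "Marriage"), ('E', "Enemies"), ('S', "Siblings")]
  (PySem.Dict.get? status_map result).getD ""   -- result is always a key (no KeyError)

-- ===== PORT B =====
def flames_alt (player1 : String) (player2 : String) : String :=
  let c1 := PySem.Chars.lower player1.toList
  let c2 := PySem.Chars.lower player2.toList
  let common_chars := PySem.Set.inter (PySem.Set.ofList c1) (PySem.Set.ofList c2)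
  let count : Int := (c1.countP (fun ch => !(PySem.Set.contains common_chars ch)) : Int)
                   + (c2.countP (fun ch => !(PySem.Set.contains common_chars ch)) : Int)
  let survivor := (PySem.List.pyRange 2 7 1).foldl (fun s i => PySem.Int.mod (s + count) i) 0
  let flames_list : List Char := ['F', 'L', 'A', 'M', 'E', 'S']
  let result := PySem.List.pyGetD flames_list survivor 'F'   -- 0 ≤ survivor < 6, in range
  let status_map : PySem.Dict Char String := PySem.Dict.ofList
    [('F', "Friends"), ('L', "Lovers"), ('A', "Affectionate"),
     ('M', "Marriage"), ('E', "Enemies"), ('S', "Siblings")]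
  (PySem.Dict.get? status_map result).getD ""

-- ===== PRECONDITION & SPEC =====
def Spec_flames (player1 : String) (player2 : String) (out : String) : Prop := out = flames_alt player1 player2
instance (player1 : String) (player2 : String) (out : String) : Decidable (Spec_flames player1 player2 out) := by unfold Spec_flames; infer_instance

-- ===== CLAIM (what is proved, stated in full; the proofs are below) =====
def Claim_equal_flames : Prop := ∀ (player1 : String) (player2 : String), Dom_flames player1 player2 → Spec_flames player1 player2 (flames player1 player2)

-- ===== LEMMAS AND PROOFS =====

-- A's loop only ever sees lists of length ≤ 6 and all those lengths divide 60,
-- so its result depends on count only through count % 60.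
lemma flamesLoopAux_congr : ∀ (n : Nat) (arr : List Char) (index c r : Int),
    arr.length ≤ 6 → c % 60 = r % 60 →
    flamesLoopAux n arr index c = flamesLoopAux n arr index r := by
  intro n
  induction n with
  | zero => intro arr index c r _ _; rfl
  | succ n ih =>
    intro arr index c r hlen hmod
    show flamesLoopAux (n+1) arr index c = flamesLoopAux (n+1) arr index r
    simp only [flamesLoopAux]
    by_cases h : 1 < arr.length
    · simp only [h, if_true]
      have hidx : PySem.Int.mod (index + c - 1) (arr.length : Int)
                = PySem.Int.mod (index + r - 1) (arr.length : Int) := by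
        have hpos : (0 : Int) < (arr.length : Int) := by exact_mod_cast Nat.lt_of_lt_of_le Nat.zero_lt_one (Nat.le_of_lt h)
        rw [PySem.Int.mod_eq_emod_of_pos hpos, PySem.Int.mod_eq_emod_of_pos hpos]
        interval_cases hm : arr.length <;> simp_all <;> omega
      rw [hidx]
      cases hp : PySem.List.pop? arr (PySem.Int.mod (index + r - 1) (arr.length : Int)) with
      | none => rfl
      | some p =>
        have hrl := PySem.List.length_of_pop?_eq_some (xs := arr) hp
        exact ih p.2 _ c r (by omega) hmod
    · simp [h]
  
-- The core equality: for every nonnegative count, A's surviving letter equals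
-- B's Josephus-indexed letter.
lemma core_eq (c : Int) :
    (flamesLoopAux 6 ['F','L','A','M','E','S'] 0 c).headD 'F'
      = PySem.List.pyGetD ['F','L','A','M','E','S']
          ((PySem.List.pyRange 2 7 1).foldl (fun s i => PySem.Int.mod (s + c) i) 0) 'F' := by
  set r : Nat := (c % 60).toNat with hr
  have hcr : c % 60 = (r : Int) % 60 := by
    have h0 : 0 ≤ c % 60 := Int.emod_nonneg c (by norm_num)
    have h1 : c % 60 < 60 := Int.emod_lt_of_pos c (by norm_num)
    omega
  have hA : flamesLoopAux 6 ['F','L','A','M','E','S'] 0 c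
          = flamesLoopAux 6 ['F','L','A','M','E','S'] 0 (r : Int) :=
    flamesLoopAux_congr 6 _ 0 c (r : Int) (by decide) hcr
  have hrange : PySem.List.pyRange 2 7 1 = [2,3,4,5,6] := by decide
  have hB : (PySem.List.pyRange 2 7 1).foldl (fun s i => PySem.Int.mod (s + c) i) 0
          = (PySem.List.pyRange 2 7 1).foldl (fun s i => PySem.Int.mod (s + (r : Int)) i) 0 := by
    rw [hrange]
    simp only [List.foldl]
    rw [PySem.Int.mod_eq_emod_of_pos (by norm_num), PySem.Int.mod_eq_emod_of_pos (by norm_num),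
        PySem.Int.mod_eq_emod_of_pos (by norm_num), PySem.Int.mod_eq_emod_of_pos (by norm_num),
        PySem.Int.mod_eq_emod_of_pos (by norm_num), PySem.Int.mod_eq_emod_of_pos (by norm_num),
        PySem.Int.mod_eq_emod_of_pos (by norm_num), PySem.Int.mod_eq_emod_of_pos (by norm_num),
        PySem.Int.mod_eq_emod_of_pos (by norm_num), PySem.Int.mod_eq_emod_of_pos (by norm_num)]
    have h2 : (0 + c) % 2 = (0 + (r : Int)) % 2 := by omega
    have h3 : ((0 + c) % 2 + c) % 3 = ((0 + (r : Int)) % 2 + (r : Int)) % 3 := by omega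
    have h4 : (((0 + c) % 2 + c) % 3 + c) % 4
            = (((0 + (r : Int)) % 2 + (r : Int)) % 3 + (r : Int)) % 4 := by omega
    have h5 : ((((0 + c) % 2 + c) % 3 + c) % 4 + c) % 5
            = ((((0 + (r : Int)) % 2 + (r : Int)) % 3 + (r : Int)) % 4 + (r : Int)) % 5 := by omega
    omega
  rw [hA, hB, hrange]
  have key : ∀ m : Nat, m < 60 →
      (flamesLoopAux 6 ['F','L','A','M','E','S'] 0 (m : Int)).headD 'F'
        = PySem.List.pyGetD ['F','L','A','M','E','S']
            (([2,3,4,5,6] : List Int).foldl (fun s i => PySem.Int.mod (s + (m : Int)) i) 0) 'F' := by decide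
  have hlt : r < 60 := by
    have h1 : c % 60 < 60 := Int.emod_lt_of_pos c (by norm_num)
    have h0 : 0 ≤ c % 60 := Int.emod_nonneg c (by norm_num)
    omega
  exact key r hlt

-- ===== VERDICT (by name: the statement is the Claim_ definition above) =====
theorem flames_spec : Claim_equal_flames := by
  intro player1 player2 _
  show flames player1 player2 = flames_alt player1 player2
  simp only [flames, flames_alt, List.countP_eq_length_filter]
  have h6 : (['F','L','A','M','E','S'] : List Char).length = 6 := rfl
  rw [h6, core_eq]
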